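-- pv_equiv track=rewrite | github.com/arthurMedforth/python-AoC22 | 2023/Day10.py | findConnectingPipes
-- ===== SOURCE A (Python) =====
-- def findConnectingPipes(r_pos,c_pos,grid):
--     connecting_pipes = []
--     curr_char = grid[r_pos][c_pos]
--     # List of adjacent coords
--     adj_coords = [[r_pos, c_pos-1],[r_pos-1, c_pos],[r_pos+1, c_pos],[r_pos, c_pos+1]]
--     for adj_coord in adj_coords:
--         r, c = adj_coord
--         # Check that the coords are valid
--         if not (r < 0 or c < 0 or r > len(grid) - 1 or c > len(grid[r]) - 1):
--             new_char = grid[r][c]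
--             if curr_char == '7': # new_char can only be to the left or below the curr char
--                 if c == c_pos - 1 and new_char in ['-','L','F','S']:
--                     connecting_pipes.append([r,c])
--                 elif r == r_pos + 1 and new_char in ['|','L','J','S']:
--                     connecting_pipes.append([r,c])
--                 else:
--                     continue
--             elif curr_char == 'F': # new_char can only be to the right or below the curr char
--                 if c == c_pos + 1 and new_char in ['-','7','J','S']:
--                     connecting_pipes.append([r,c])
--                 elif r == r_pos + 1 and new_char in ['|','L','J','S']:
--                     connecting_pipes.append([r,c])
--                 else:
--                     continue
--             elif curr_char == 'L': # new_char can only be to the right or above the curr char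
--                 if c == c_pos + 1 and new_char in ['-','J','7','S']:
--                     connecting_pipes.append([r,c])
--                 elif r == r_pos - 1 and new_char in ['|','7','F','S']:
--                     connecting_pipes.append([r,c])
--                 else:
--                     continue
--             elif curr_char == 'J': # new_char can only be to the left or above the curr char
--                 if c == c_pos - 1 and new_char in ['-','L','F','S']:
--                     connecting_pipes.append([r,c])
--                 elif r == r_pos - 1 and new_char in ['|','7','F','S']:
--                     connecting_pipes.append([r,c])
--                 else:
--                     continue
--             elif curr_char == '|':
--                 # new_char can only be to above or below the curr char
--                 if r == r_pos - 1 and new_char in ['|','7','F','S']: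
--                     connecting_pipes.append([r,c])
--                 elif r == r_pos + 1 and new_char in ['|','L','J','S']:
--                     connecting_pipes.append([r,c])
--                 else:
--                     continue
--             elif curr_char == '-':
--                 # new_char can only be to the left or right of the curr_char
--                 if c == c_pos - 1 and new_char in ['-','L','F','S']:
--                     connecting_pipes.append([r,c])
--                 elif c == c_pos + 1 and new_char in ['-','7','J','S']:
--                     connecting_pipes.append([r,c])
--                 else:
--                     continue
--             else:
--                 raise ValueError(f'curr_char value {curr_char} invalid')
--         if len(connecting_pipes) == 2:
--             break
--     return connecting_pipes
-- ===== SOURCE B (Python) =====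
-- # Each pipe opens toward exactly two neighbouring cells; two cells connect iff each
-- # opens toward the other (or the neighbour is the start 'S').  Instead of scanning all
-- # four neighbours and branching on the current char, B jumps directly to the current
-- # pipe's two opening cells (listed in the scan order left,up,down,right) and keeps the
-- # ones that are in bounds and reciprocate.
-- OPENINGS = {
--     '|': ((-1, 0), (1, 0)),
--     '-': ((0, -1), (0, 1)),
--     'L': ((-1, 0), (0, 1)),
--     'J': ((0, -1), (-1, 0)),
--     '7': ((0, -1), (1, 0)),
--     'F': ((1, 0), (0, 1)),
-- }
--
-- def findConnectingPipes(r_pos, c_pos, grid):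
--     curr = grid[r_pos][c_pos]
--     if curr not in OPENINGS:
--         raise ValueError(f'curr_char value {curr} invalid')
--     out = []
--     for dr, dc in OPENINGS[curr]:
--         r, c = r_pos + dr, c_pos + dc
--         if 0 <= r < len(grid) and 0 <= c < len(grid[r]):
--             nb = grid[r][c]
--             if nb == 'S' or (-dr, -dc) in OPENINGS.get(nb, ()):
--                 out.append([r, c])
--     return out
-- ===== Notes on version B (the rewrite author's own statement) =====
-- stated objective: alternative
-- what changed: A scans all four neighbours and runs a six-branch if/elif chain with 24 hard-coded partner lists for each; B never scans: it jumps directly to the current pipe's two opening cells (from an OPENINGS table, pairs pre-ordered in A's scan order) and keeps each one that is in bounds and reciprocates (neighbour is 'S' or its own openings point back), validating the current char once up front.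
-- outside the precondition, e.g. on findConnectingPipes(0, 0, [['x']]): A returns [], B raises ValueError
import Mathlib
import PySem

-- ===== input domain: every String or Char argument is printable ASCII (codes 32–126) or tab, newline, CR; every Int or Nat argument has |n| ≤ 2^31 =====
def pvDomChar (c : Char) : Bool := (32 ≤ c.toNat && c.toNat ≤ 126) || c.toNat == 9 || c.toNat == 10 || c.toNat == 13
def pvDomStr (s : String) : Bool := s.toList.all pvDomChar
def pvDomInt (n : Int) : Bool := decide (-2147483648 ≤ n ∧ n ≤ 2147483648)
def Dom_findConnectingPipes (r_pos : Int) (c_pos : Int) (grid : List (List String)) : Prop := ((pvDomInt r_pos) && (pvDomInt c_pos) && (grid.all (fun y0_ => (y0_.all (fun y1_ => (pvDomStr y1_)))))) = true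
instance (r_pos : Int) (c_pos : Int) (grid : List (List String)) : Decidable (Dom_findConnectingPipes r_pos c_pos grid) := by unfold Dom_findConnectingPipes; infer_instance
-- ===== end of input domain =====

-- B replaces A's four-neighbour scan with its six-branch if/elif chain by jumping directly
-- to the current pipe's two opening cells and testing reciprocity; objective: alternative.
-- Equivalence is about the return value on Pre_ (where A neither raises IndexError nor ValueError).

-- ===== PORT A =====
-- one iteration body of A's for-loop (the in-bounds check and the if/elif chain);
-- the final `else: raise ValueError` is unreachable under Pre_ (curr is a pipe char);
-- the port returns acc there.
def fcpStepA (r_pos c_pos : Int) (grid : List (List String)) (curr : String)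
    (acc : List (List Int)) (rc : Int × Int) : List (List Int) :=
  let r := rc.1
  let c := rc.2
  if ¬ (r < 0 ∨ c < 0 ∨ r > (grid.length : Int) - 1 ∨
        c > (((PySem.List.pyGet? grid r).getD []).length : Int) - 1) then
    let new_char := PySem.List.pyGetD ((PySem.List.pyGet? grid r).getD []) c ""
    if curr = "7" then
      if c = c_pos - 1 ∧ (["-","L","F","S"] : List String).contains new_char then acc ++ [[r, c]]
      else if r = r_pos + 1 ∧ (["|","L","J","S"] : List String).contains new_char then acc ++ [[r, c]]
      else acc
    else if curr = "F" then
      if c = c_pos + 1 ∧ (["-","7","J","S"] : List String).contains new_char then acc ++ [[r, c]]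
      else if r = r_pos + 1 ∧ (["|","L","J","S"] : List String).contains new_char then acc ++ [[r, c]]
      else acc
    else if curr = "L" then
      if c = c_pos + 1 ∧ (["-","J","7","S"] : List String).contains new_char then acc ++ [[r, c]]
      else if r = r_pos - 1 ∧ (["|","7","F","S"] : List String).contains new_char then acc ++ [[r, c]]
      else acc
    else if curr = "J" then
      if c = c_pos - 1 ∧ (["-","L","F","S"] : List String).contains new_char then acc ++ [[r, c]]
      else if r = r_pos - 1 ∧ (["|","7","F","S"] : List String).contains new_char then acc ++ [[r, c]]
      else acc
    else if curr = "|" then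
      if r = r_pos - 1 ∧ (["|","7","F","S"] : List String).contains new_char then acc ++ [[r, c]]
      else if r = r_pos + 1 ∧ (["|","L","J","S"] : List String).contains new_char then acc ++ [[r, c]]
      else acc
    else if curr = "-" then
      if c = c_pos - 1 ∧ (["-","L","F","S"] : List String).contains new_char then acc ++ [[r, c]]
      else if c = c_pos + 1 ∧ (["-","7","J","S"] : List String).contains new_char then acc ++ [[r, c]]
      else acc
    else acc  -- Python: raise ValueError (outside Pre_)
  else acc

-- A's for-loop with the `if len(connecting_pipes) == 2: break` check after each iteration
def fcpLoopA (r_pos c_pos : Int) (grid : List (List String)) (curr : String) :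
    List (Int × Int) → List (List Int) → List (List Int)
  | [], acc => acc
  | rc :: rest, acc =>
    let acc' := fcpStepA r_pos c_pos grid curr acc rc
    if acc'.length = 2 then acc' else fcpLoopA r_pos c_pos grid curr rest acc'

def findConnectingPipes (r_pos : Int) (c_pos : Int) (grid : List (List String)) : List (List Int) :=
  match PySem.List.pyGet? grid r_pos with
  | none => []          -- Python: IndexError (outside Pre_)
  | some row =>
    match PySem.List.pyGet? row c_pos with
    | none => []        -- Python: IndexError (outside Pre_)
    | some curr =>
      fcpLoopA r_pos c_pos grid curr
        [(r_pos, c_pos - 1), (r_pos - 1, c_pos), (r_pos + 1, c_pos), (r_pos, c_pos + 1)] []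

-- ===== PORT B =====
-- the module-level OPENINGS table of Source B: each pipe's two opening direction deltas
def pvOpenings : PySem.Dict String (List (Int × Int)) :=
  PySem.Dict.ofList
    [("|", [(-1, 0), (1, 0)]), ("-", [(0, -1), (0, 1)]), ("L", [(-1, 0), (0, 1)]),
     ("J", [(0, -1), (-1, 0)]), ("7", [(0, -1), (1, 0)]), ("F", [(1, 0), (0, 1)])]

-- `nb == 'S' or (-dr, -dc) in OPENINGS.get(nb, ())`
def fcpBack (nb : String) (d : Int × Int) : Bool :=
  nb == "S" || (PySem.Dict.getD pvOpenings nb []).contains (-d.1, -d.2)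

-- one iteration of Source B's loop over curr's two opening deltas
def fcpStepB (r_pos c_pos : Int) (grid : List (List String))
    (out : List (List Int)) (d : Int × Int) : List (List Int) :=
  let r := r_pos + d.1
  let c := c_pos + d.2
  if 0 ≤ r ∧ r < (grid.length : Int) then
    let row := (PySem.List.pyGet? grid r).getD []
    if 0 ≤ c ∧ c < (row.length : Int) then
      if fcpBack (PySem.List.pyGetD row c "") d then out ++ [[r, c]] else out
    else out
  else out

def findConnectingPipes_alt (r_pos : Int) (c_pos : Int) (grid : List (List String)) : List (List Int) :=
  match PySem.List.pyGet? grid r_pos with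
  | none => []          -- Python: IndexError (outside Pre_)
  | some row =>
    match PySem.List.pyGet? row c_pos with
    | none => []        -- Python: IndexError (outside Pre_)
    | some curr =>
      match PySem.Dict.get? pvOpenings curr with
      | none => []      -- Python: raise ValueError (outside Pre_)
      | some dirs => dirs.foldl (fcpStepB r_pos c_pos grid) []

-- ===== PRECONDITION & SPEC =====
-- Pre_ excludes inputs where reading grid[r_pos][c_pos] raises IndexError, and inputs whose
-- current cell is not one of the six pipe characters: there A raises ValueError at the first
-- in-bounds neighbor and returns [] only in the degenerate case with no in-bounds neighbor,
-- where B (which validates curr up front) raises ValueError instead.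
def Pre_findConnectingPipes (r_pos : Int) (c_pos : Int) (grid : List (List String)) : Prop :=
  ((PySem.List.pyGet? grid r_pos).bind (fun row => PySem.List.pyGet? row c_pos)) ∈
    ([some "|", some "-", some "L", some "J", some "7", some "F"] : List (Option String))
instance (r_pos : Int) (c_pos : Int) (grid : List (List String)) : Decidable (Pre_findConnectingPipes r_pos c_pos grid) := by unfold Pre_findConnectingPipes; infer_instance

def pvWitness_findConnectingPipes : Int × Int × List (List String) := (0, 0, [["|"], ["|"]])

def Spec_findConnectingPipes (r_pos : Int) (c_pos : Int) (grid : List (List String)) (out : List (List Int)) : Prop := out = findConnectingPipes_alt r_pos c_pos grid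
instance (r_pos : Int) (c_pos : Int) (grid : List (List String)) (out : List (List Int)) : Decidable (Spec_findConnectingPipes r_pos c_pos grid out) := by unfold Spec_findConnectingPipes; infer_instance

-- ===== CLAIM (what is proved, stated in full; the proofs are below) =====
def Claim_equal_findConnectingPipes : Prop := ∀ (r_pos : Int) (c_pos : Int) (grid : List (List String)), Dom_findConnectingPipes r_pos c_pos grid → Pre_findConnectingPipes r_pos c_pos grid → Spec_findConnectingPipes r_pos c_pos grid (findConnectingPipes r_pos c_pos grid)

-- ===== LEMMAS AND PROOFS =====

-- pvOpenings written as a literal Dict (for get? reduction)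
theorem pvOpenings_eq : pvOpenings = PySem.Dict.mk
    [("|", [(-1, 0), (1, 0)]), ("-", [(0, -1), (0, 1)]), ("L", [(-1, 0), (0, 1)]),
     ("J", [(0, -1), (-1, 0)]), ("7", [(0, -1), (1, 0)]), ("F", [(1, 0), (0, 1)])] := by
  decide

-- the four "points back" checks of B coincide with A's four membership lists
theorem fcpBack_left (s : String) :
    fcpBack s (0, -1) = (["-","L","F","S"] : List String).contains s := by
  by_cases h1 : s = "|"; · subst h1; decide
  by_cases h2 : s = "-"; · subst h2; decide
  by_cases h3 : s = "L"; · subst h3; decide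
  by_cases h4 : s = "J"; · subst h4; decide
  by_cases h5 : s = "7"; · subst h5; decide
  by_cases h6 : s = "F"; · subst h6; decide
  by_cases h7 : s = "S"; · subst h7; decide
  simp [fcpBack, pvOpenings_eq, PySem.Dict.getD, PySem.Dict.get?_mk_cons, PySem.Dict.get?,
        Ne.symm h1, Ne.symm h2, Ne.symm h3, Ne.symm h4, Ne.symm h5, Ne.symm h6, Ne.symm h7,
        beq_iff_eq, h1, h2, h3, h4, h5, h6, h7]

theorem fcpBack_up (s : String) :
    fcpBack s (-1, 0) = (["|","7","F","S"] : List String).contains s := by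
  by_cases h1 : s = "|"; · subst h1; decide
  by_cases h2 : s = "-"; · subst h2; decide
  by_cases h3 : s = "L"; · subst h3; decide
  by_cases h4 : s = "J"; · subst h4; decide
  by_cases h5 : s = "7"; · subst h5; decide
  by_cases h6 : s = "F"; · subst h6; decide
  by_cases h7 : s = "S"; · subst h7; decide
  simp [fcpBack, pvOpenings_eq, PySem.Dict.getD, PySem.Dict.get?_mk_cons, PySem.Dict.get?,
        Ne.symm h1, Ne.symm h2, Ne.symm h3, Ne.symm h4, Ne.symm h5, Ne.symm h6, Ne.symm h7,
        beq_iff_eq, h1, h2, h3, h4, h5, h6, h7]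

theorem fcpBack_down (s : String) :
    fcpBack s (1, 0) = (["|","L","J","S"] : List String).contains s := by
  by_cases h1 : s = "|"; · subst h1; decide
  by_cases h2 : s = "-"; · subst h2; decide
  by_cases h3 : s = "L"; · subst h3; decide
  by_cases h4 : s = "J"; · subst h4; decide
  by_cases h5 : s = "7"; · subst h5; decide
  by_cases h6 : s = "F"; · subst h6; decide
  by_cases h7 : s = "S"; · subst h7; decide
  simp [fcpBack, pvOpenings_eq, PySem.Dict.getD, PySem.Dict.get?_mk_cons, PySem.Dict.get?,
        Ne.symm h1, Ne.symm h2, Ne.symm h3, Ne.symm h4, Ne.symm h5, Ne.symm h6, Ne.symm h7,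
        beq_iff_eq, h1, h2, h3, h4, h5, h6, h7]

theorem fcpBack_right (s : String) :
    fcpBack s (0, 1) = (["-","7","J","S"] : List String).contains s := by
  by_cases h1 : s = "|"; · subst h1; decide
  by_cases h2 : s = "-"; · subst h2; decide
  by_cases h3 : s = "L"; · subst h3; decide
  by_cases h4 : s = "J"; · subst h4; decide
  by_cases h5 : s = "7"; · subst h5; decide
  by_cases h6 : s = "F"; · subst h6; decide
  by_cases h7 : s = "S"; · subst h7; decide
  simp [fcpBack, pvOpenings_eq, PySem.Dict.getD, PySem.Dict.get?_mk_cons, PySem.Dict.get?,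
        Ne.symm h1, Ne.symm h2, Ne.symm h3, Ne.symm h4, Ne.symm h5, Ne.symm h6, Ne.symm h7,
        beq_iff_eq, h1, h2, h3, h4, h5, h6, h7]

-- each B step either keeps the accumulator or appends exactly one element
theorem fcpStepB_cases (r_pos c_pos : Int) (grid : List (List String))
    (acc : List (List Int)) (d : Int × Int) :
    fcpStepB r_pos c_pos grid acc d = acc ∨
    fcpStepB r_pos c_pos grid acc d = acc ++ [[r_pos + d.1, c_pos + d.2]] := by
  unfold fcpStepB
  dsimp only
  split_ifs <;> simp

-- get? on pvOpenings determines curr and dirs (six possibilities)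
theorem pvOpenings_get_cases (curr : String) (dirs : List (Int × Int))
    (hget : PySem.Dict.get? pvOpenings curr = some dirs) :
    (curr = "|" ∧ dirs = [(-1, 0), (1, 0)]) ∨ (curr = "-" ∧ dirs = [(0, -1), (0, 1)]) ∨
    (curr = "L" ∧ dirs = [(-1, 0), (0, 1)]) ∨ (curr = "J" ∧ dirs = [(0, -1), (-1, 0)]) ∨
    (curr = "7" ∧ dirs = [(0, -1), (1, 0)]) ∨ (curr = "F" ∧ dirs = [(1, 0), (0, 1)]) := by
  by_cases h1 : curr = "|"
  · subst h1
    rw [show PySem.Dict.get? pvOpenings "|" = some [(-1, 0), (1, 0)] from by decide] at hget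
    exact Or.inl ⟨rfl, (Option.some.inj hget).symm⟩
  by_cases h2 : curr = "-"
  · subst h2
    rw [show PySem.Dict.get? pvOpenings "-" = some [(0, -1), (0, 1)] from by decide] at hget
    exact Or.inr (Or.inl ⟨rfl, (Option.some.inj hget).symm⟩)
  by_cases h3 : curr = "L"
  · subst h3
    rw [show PySem.Dict.get? pvOpenings "L" = some [(-1, 0), (0, 1)] from by decide] at hget
    exact Or.inr (Or.inr (Or.inl ⟨rfl, (Option.some.inj hget).symm⟩))
  by_cases h4 : curr = "J"
  · subst h4
    rw [show PySem.Dict.get? pvOpenings "J" = some [(0, -1), (-1, 0)] from by decide] at hget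
    exact Or.inr (Or.inr (Or.inr (Or.inl ⟨rfl, (Option.some.inj hget).symm⟩)))
  by_cases h5 : curr = "7"
  · subst h5
    rw [show PySem.Dict.get? pvOpenings "7" = some [(0, -1), (1, 0)] from by decide] at hget
    exact Or.inr (Or.inr (Or.inr (Or.inr (Or.inl ⟨rfl, (Option.some.inj hget).symm⟩))))
  by_cases h6 : curr = "F"
  · subst h6
    rw [show PySem.Dict.get? pvOpenings "F" = some [(1, 0), (0, 1)] from by decide] at hget
    exact Or.inr (Or.inr (Or.inr (Or.inr (Or.inr ⟨rfl, (Option.some.inj hget).symm⟩))))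
  rw [show PySem.Dict.get? pvOpenings curr = none from by
    simp [pvOpenings_eq, PySem.Dict.get?_mk_cons, PySem.Dict.get?,
      Ne.symm h1, Ne.symm h2, Ne.symm h3, Ne.symm h4, Ne.symm h5, Ne.symm h6]] at hget
  simp at hget

-- an A step at a delta that is NOT one of curr's openings leaves the accumulator unchanged
theorem fcpStepA_noop (r_pos c_pos : Int) (grid : List (List String)) (curr : String)
    (dirs : List (Int × Int)) (hget : PySem.Dict.get? pvOpenings curr = some dirs)
    (d : Int × Int)
    (hd : d ∈ ([((0 : Int), (-1 : Int)), (-1, 0), (1, 0), (0, 1)] : List (Int × Int)))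
    (hnd : d ∉ dirs) (acc : List (List Int)) :
    fcpStepA r_pos c_pos grid curr acc (r_pos + d.1, c_pos + d.2) = acc := by
  rcases pvOpenings_get_cases curr dirs hget with ⟨rfl, rfl⟩ | ⟨rfl, rfl⟩ | ⟨rfl, rfl⟩ |
    ⟨rfl, rfl⟩ | ⟨rfl, rfl⟩ | ⟨rfl, rfl⟩ <;>
  fin_cases hd <;>
  first
    | exact absurd (by decide) hnd
    | (unfold fcpStepA;
       simp only [String.reduceEq, reduceIte];
       split_ifs <;>
         first
           | rfl
           | (exfalso; omega)
           | (exfalso; rename_i h; exact absurd h.1 (by omega)))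

-- an A step at one of curr's openings equals B's step there
set_option maxRecDepth 2048 in
theorem fcpStep_eq (r_pos c_pos : Int) (grid : List (List String)) (curr : String)
    (dirs : List (Int × Int)) (hget : PySem.Dict.get? pvOpenings curr = some dirs)
    (d : Int × Int) (hd : d ∈ dirs) (acc : List (List Int)) :
    fcpStepA r_pos c_pos grid curr acc (r_pos + d.1, c_pos + d.2) =
    fcpStepB r_pos c_pos grid acc d := by
  rcases pvOpenings_get_cases curr dirs hget with ⟨rfl, rfl⟩ | ⟨rfl, rfl⟩ | ⟨rfl, rfl⟩ |
    ⟨rfl, rfl⟩ | ⟨rfl, rfl⟩ | ⟨rfl, rfl⟩ <;>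
  (simp only [List.mem_cons, List.not_mem_nil, or_false] at hd;
   rcases hd with rfl | rfl) <;>
  (unfold fcpStepA fcpStepB; dsimp only) <;>
  simp [fcpBack_left, fcpBack_up, fcpBack_down, fcpBack_right, sub_eq_add_neg,
    add_right_inj] <;>
  first
    | rfl
    | (intros; omega)
    | (split_ifs <;>
        first
          | rfl
          | omega
          | (exact absurd (by assumption) (by assumption))
          | tauto)

-- A's loop with break equals B's foldl over curr's two openings
theorem fcpLoop_eq_foldl (r_pos c_pos : Int) (grid : List (List String)) (curr : String)
    (dirs : List (Int × Int)) (hget : PySem.Dict.get? pvOpenings curr = some dirs) :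
    fcpLoopA r_pos c_pos grid curr
      [(r_pos, c_pos - 1), (r_pos - 1, c_pos), (r_pos + 1, c_pos), (r_pos, c_pos + 1)] [] =
    dirs.foldl (fcpStepB r_pos c_pos grid) [] := by
  rcases pvOpenings_get_cases curr dirs hget with ⟨rfl, rfl⟩ | ⟨rfl, rfl⟩ | ⟨rfl, rfl⟩ |
    ⟨rfl, rfl⟩ | ⟨rfl, rfl⟩ | ⟨rfl, rfl⟩
  ·
    have h1 : ∀ acc, fcpStepA r_pos c_pos grid "|" acc (r_pos, c_pos - 1) = acc := fun acc => by
      simpa [sub_eq_add_neg] using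
        fcpStepA_noop r_pos c_pos grid "|" [(-1, 0), (1, 0)] (by decide) (0, -1) (by decide) (by decide) acc
    have h2 : ∀ acc, fcpStepA r_pos c_pos grid "|" acc (r_pos - 1, c_pos) =
        fcpStepB r_pos c_pos grid acc (-1, 0) := fun acc => by
      simpa [sub_eq_add_neg] using
        fcpStep_eq r_pos c_pos grid "|" [(-1, 0), (1, 0)] (by decide) (-1, 0) (by decide) acc
    have h3 : ∀ acc, fcpStepA r_pos c_pos grid "|" acc (r_pos + 1, c_pos) =
        fcpStepB r_pos c_pos grid acc (1, 0) := fun acc => by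
      simpa [sub_eq_add_neg] using
        fcpStep_eq r_pos c_pos grid "|" [(-1, 0), (1, 0)] (by decide) (1, 0) (by decide) acc
    have h4 : ∀ acc, fcpStepA r_pos c_pos grid "|" acc (r_pos, c_pos + 1) = acc := fun acc => by
      simpa [sub_eq_add_neg] using
        fcpStepA_noop r_pos c_pos grid "|" [(-1, 0), (1, 0)] (by decide) (0, 1) (by decide) (by decide) acc
    simp only [fcpLoopA, List.foldl, h1, h2, h3, h4]
    rcases fcpStepB_cases r_pos c_pos grid [] (-1, 0) with ha | ha <;>
      rcases fcpStepB_cases r_pos c_pos grid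
        (fcpStepB r_pos c_pos grid [] (-1, 0)) (1, 0) with hb | hb <;>
      simp [ha, hb]
  ·
    have h1 : ∀ acc, fcpStepA r_pos c_pos grid "-" acc (r_pos, c_pos - 1) =
        fcpStepB r_pos c_pos grid acc (0, -1) := fun acc => by
      simpa [sub_eq_add_neg] using
        fcpStep_eq r_pos c_pos grid "-" [(0, -1), (0, 1)] (by decide) (0, -1) (by decide) acc
    have h2 : ∀ acc, fcpStepA r_pos c_pos grid "-" acc (r_pos - 1, c_pos) = acc := fun acc => by
      simpa [sub_eq_add_neg] using
        fcpStepA_noop r_pos c_pos grid "-" [(0, -1), (0, 1)] (by decide) (-1, 0) (by decide) (by decide) acc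
    have h3 : ∀ acc, fcpStepA r_pos c_pos grid "-" acc (r_pos + 1, c_pos) = acc := fun acc => by
      simpa [sub_eq_add_neg] using
        fcpStepA_noop r_pos c_pos grid "-" [(0, -1), (0, 1)] (by decide) (1, 0) (by decide) (by decide) acc
    have h4 : ∀ acc, fcpStepA r_pos c_pos grid "-" acc (r_pos, c_pos + 1) =
        fcpStepB r_pos c_pos grid acc (0, 1) := fun acc => by
      simpa [sub_eq_add_neg] using
        fcpStep_eq r_pos c_pos grid "-" [(0, -1), (0, 1)] (by decide) (0, 1) (by decide) acc
    simp only [fcpLoopA, List.foldl, h1, h2, h3, h4]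
    rcases fcpStepB_cases r_pos c_pos grid [] (0, -1) with ha | ha <;>
      rcases fcpStepB_cases r_pos c_pos grid
        (fcpStepB r_pos c_pos grid [] (0, -1)) (0, 1) with hb | hb <;>
      simp [ha, hb]
  ·
    have h1 : ∀ acc, fcpStepA r_pos c_pos grid "L" acc (r_pos, c_pos - 1) = acc := fun acc => by
      simpa [sub_eq_add_neg] using
        fcpStepA_noop r_pos c_pos grid "L" [(-1, 0), (0, 1)] (by decide) (0, -1) (by decide) (by decide) acc
    have h2 : ∀ acc, fcpStepA r_pos c_pos grid "L" acc (r_pos - 1, c_pos) =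
        fcpStepB r_pos c_pos grid acc (-1, 0) := fun acc => by
      simpa [sub_eq_add_neg] using
        fcpStep_eq r_pos c_pos grid "L" [(-1, 0), (0, 1)] (by decide) (-1, 0) (by decide) acc
    have h3 : ∀ acc, fcpStepA r_pos c_pos grid "L" acc (r_pos + 1, c_pos) = acc := fun acc => by
      simpa [sub_eq_add_neg] using
        fcpStepA_noop r_pos c_pos grid "L" [(-1, 0), (0, 1)] (by decide) (1, 0) (by decide) (by decide) acc
    have h4 : ∀ acc, fcpStepA r_pos c_pos grid "L" acc (r_pos, c_pos + 1) =
        fcpStepB r_pos c_pos grid acc (0, 1) := fun acc => by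
      simpa [sub_eq_add_neg] using
        fcpStep_eq r_pos c_pos grid "L" [(-1, 0), (0, 1)] (by decide) (0, 1) (by decide) acc
    simp only [fcpLoopA, List.foldl, h1, h2, h3, h4]
    rcases fcpStepB_cases r_pos c_pos grid [] (-1, 0) with ha | ha <;>
      rcases fcpStepB_cases r_pos c_pos grid
        (fcpStepB r_pos c_pos grid [] (-1, 0)) (0, 1) with hb | hb <;>
      simp [ha, hb]
  ·
    have h1 : ∀ acc, fcpStepA r_pos c_pos grid "J" acc (r_pos, c_pos - 1) =
        fcpStepB r_pos c_pos grid acc (0, -1) := fun acc => by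
      simpa [sub_eq_add_neg] using
        fcpStep_eq r_pos c_pos grid "J" [(0, -1), (-1, 0)] (by decide) (0, -1) (by decide) acc
    have h2 : ∀ acc, fcpStepA r_pos c_pos grid "J" acc (r_pos - 1, c_pos) =
        fcpStepB r_pos c_pos grid acc (-1, 0) := fun acc => by
      simpa [sub_eq_add_neg] using
        fcpStep_eq r_pos c_pos grid "J" [(0, -1), (-1, 0)] (by decide) (-1, 0) (by decide) acc
    have h3 : ∀ acc, fcpStepA r_pos c_pos grid "J" acc (r_pos + 1, c_pos) = acc := fun acc => by
      simpa [sub_eq_add_neg] using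
        fcpStepA_noop r_pos c_pos grid "J" [(0, -1), (-1, 0)] (by decide) (1, 0) (by decide) (by decide) acc
    have h4 : ∀ acc, fcpStepA r_pos c_pos grid "J" acc (r_pos, c_pos + 1) = acc := fun acc => by
      simpa [sub_eq_add_neg] using
        fcpStepA_noop r_pos c_pos grid "J" [(0, -1), (-1, 0)] (by decide) (0, 1) (by decide) (by decide) acc
    simp only [fcpLoopA, List.foldl, h1, h2, h3, h4]
    rcases fcpStepB_cases r_pos c_pos grid [] (0, -1) with ha | ha <;>
      rcases fcpStepB_cases r_pos c_pos grid
        (fcpStepB r_pos c_pos grid [] (0, -1)) (-1, 0) with hb | hb <;>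
      simp [ha, hb]
  ·
    have h1 : ∀ acc, fcpStepA r_pos c_pos grid "7" acc (r_pos, c_pos - 1) =
        fcpStepB r_pos c_pos grid acc (0, -1) := fun acc => by
      simpa [sub_eq_add_neg] using
        fcpStep_eq r_pos c_pos grid "7" [(0, -1), (1, 0)] (by decide) (0, -1) (by decide) acc
    have h2 : ∀ acc, fcpStepA r_pos c_pos grid "7" acc (r_pos - 1, c_pos) = acc := fun acc => by
      simpa [sub_eq_add_neg] using
        fcpStepA_noop r_pos c_pos grid "7" [(0, -1), (1, 0)] (by decide) (-1, 0) (by decide) (by decide) acc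
    have h3 : ∀ acc, fcpStepA r_pos c_pos grid "7" acc (r_pos + 1, c_pos) =
        fcpStepB r_pos c_pos grid acc (1, 0) := fun acc => by
      simpa [sub_eq_add_neg] using
        fcpStep_eq r_pos c_pos grid "7" [(0, -1), (1, 0)] (by decide) (1, 0) (by decide) acc
    have h4 : ∀ acc, fcpStepA r_pos c_pos grid "7" acc (r_pos, c_pos + 1) = acc := fun acc => by
      simpa [sub_eq_add_neg] using
        fcpStepA_noop r_pos c_pos grid "7" [(0, -1), (1, 0)] (by decide) (0, 1) (by decide) (by decide) acc
    simp only [fcpLoopA, List.foldl, h1, h2, h3, h4]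
    rcases fcpStepB_cases r_pos c_pos grid [] (0, -1) with ha | ha <;>
      rcases fcpStepB_cases r_pos c_pos grid
        (fcpStepB r_pos c_pos grid [] (0, -1)) (1, 0) with hb | hb <;>
      simp [ha, hb]
  ·
    have h1 : ∀ acc, fcpStepA r_pos c_pos grid "F" acc (r_pos, c_pos - 1) = acc := fun acc => by
      simpa [sub_eq_add_neg] using
        fcpStepA_noop r_pos c_pos grid "F" [(1, 0), (0, 1)] (by decide) (0, -1) (by decide) (by decide) acc
    have h2 : ∀ acc, fcpStepA r_pos c_pos grid "F" acc (r_pos - 1, c_pos) = acc := fun acc => by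
      simpa [sub_eq_add_neg] using
        fcpStepA_noop r_pos c_pos grid "F" [(1, 0), (0, 1)] (by decide) (-1, 0) (by decide) (by decide) acc
    have h3 : ∀ acc, fcpStepA r_pos c_pos grid "F" acc (r_pos + 1, c_pos) =
        fcpStepB r_pos c_pos grid acc (1, 0) := fun acc => by
      simpa [sub_eq_add_neg] using
        fcpStep_eq r_pos c_pos grid "F" [(1, 0), (0, 1)] (by decide) (1, 0) (by decide) acc
    have h4 : ∀ acc, fcpStepA r_pos c_pos grid "F" acc (r_pos, c_pos + 1) =
        fcpStepB r_pos c_pos grid acc (0, 1) := fun acc => by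
      simpa [sub_eq_add_neg] using
        fcpStep_eq r_pos c_pos grid "F" [(1, 0), (0, 1)] (by decide) (0, 1) (by decide) acc
    simp only [fcpLoopA, List.foldl, h1, h2, h3, h4]
    rcases fcpStepB_cases r_pos c_pos grid [] (1, 0) with ha | ha <;>
      rcases fcpStepB_cases r_pos c_pos grid
        (fcpStepB r_pos c_pos grid [] (1, 0)) (0, 1) with hb | hb <;>
      simp [ha, hb]

theorem findConnectingPipes_spec0 (r_pos c_pos : Int) (grid : List (List String))
    (hpre : Pre_findConnectingPipes r_pos c_pos grid) :
    findConnectingPipes r_pos c_pos grid = findConnectingPipes_alt r_pos c_pos grid := by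
  unfold Pre_findConnectingPipes at hpre
  cases hrow : PySem.List.pyGet? grid r_pos with
  | none => simp [hrow] at hpre
  | some row =>
  cases hcur : PySem.List.pyGet? row c_pos with
  | none => simp [hrow, hcur] at hpre
  | some curr =>
  have hget : ∃ dirs, PySem.Dict.get? pvOpenings curr = some dirs := by
    simp [hrow, hcur] at hpre
    rcases hpre with rfl | rfl | rfl | rfl | rfl | rfl
    · exact ⟨[(-1, 0), (1, 0)], by decide⟩
    · exact ⟨[(0, -1), (0, 1)], by decide⟩
    · exact ⟨[(-1, 0), (0, 1)], by decide⟩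
    · exact ⟨[(0, -1), (-1, 0)], by decide⟩
    · exact ⟨[(0, -1), (1, 0)], by decide⟩
    · exact ⟨[(1, 0), (0, 1)], by decide⟩
  obtain ⟨dirs, hget⟩ := hget
  unfold findConnectingPipes findConnectingPipes_alt
  simp only [hrow, hcur, hget]
  exact fcpLoop_eq_foldl r_pos c_pos grid curr dirs hget

-- ===== VERDICT (by name: the statement is the Claim_ definition above) =====
theorem findConnectingPipes_spec : Claim_equal_findConnectingPipes := by
  intro r_pos c_pos grid _ hpre
  exact findConnectingPipes_spec0 r_pos c_pos grid hpre
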